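-- pv_equiv track=rewrite | github.com/pulp-bio/Artifact-Seizure | Seizure_Detection/utils/metrics_EEG.py | drop_anomaly
-- ===== SOURCE A (Python) =====
-- def drop_anomaly(predicted, observed, interval):
--     """
--     Drop false positive predictions over a specified interval based on observed data.
--     Useful for filtering anomalies from the prediction sequence.
--
--     Parameters:
--     predicted (list): Binary prediction sequence
--     observed (list): Binary observation sequence for comparison
--     interval (int): Interval length in seconds
--
--     Returns:
--     list: Modified binary prediction sequence with anomalies dropped
--     """
--     span = int(60 * 15 / interval)
--     mod_pred = predicted.copy()
--     for idx in range(len(observed) - 1):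
--         if observed[idx] == 1 and observed[idx + 1] == 0:
--             span = min(span, len(observed) - idx)
--             for offset in range(span):
--                 mod_pred[idx + offset] = 0
--     return mod_pred
-- ===== SOURCE B (Python) =====
-- def drop_anomaly(predicted, observed, interval):
--     span0 = int(60 * 15 / interval)
--     n = len(observed)
--     out = []
--     reach = 0
--     for i, p in enumerate(predicted):
--         if i + 1 < n and observed[i] == 1 and observed[i + 1] == 0:
--             reach = max(reach, i + min(span0, n - i))
--         out.append(0 if i < reach else p)
--     return out
-- ===== Notes on version B (the rewrite author's own statement) =====
-- stated objective: alternative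
-- what changed: B replaces A's nested re-zeroing loops (one inner write loop per 1-to-0 transition, overlapping runs rewritten repeatedly) by a single left-to-right pass that keeps a running 'reach' (the right end of the union of zeroing intervals seen so far) and emits each output element once.
import Mathlib
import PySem

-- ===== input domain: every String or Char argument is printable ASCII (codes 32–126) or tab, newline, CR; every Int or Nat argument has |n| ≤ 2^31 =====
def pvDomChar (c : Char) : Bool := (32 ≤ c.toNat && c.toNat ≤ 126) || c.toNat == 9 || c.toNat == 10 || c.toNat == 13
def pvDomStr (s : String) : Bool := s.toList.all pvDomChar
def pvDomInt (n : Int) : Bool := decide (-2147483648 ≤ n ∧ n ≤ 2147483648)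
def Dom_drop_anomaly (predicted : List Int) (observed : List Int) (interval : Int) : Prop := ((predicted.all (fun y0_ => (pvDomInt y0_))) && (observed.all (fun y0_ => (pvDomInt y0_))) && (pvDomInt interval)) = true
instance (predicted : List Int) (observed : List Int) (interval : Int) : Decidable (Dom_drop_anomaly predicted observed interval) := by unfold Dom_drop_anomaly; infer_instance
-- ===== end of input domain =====

-- B replaces A's nested rewrite loops (one zeroing run per 1→0 transition, overlapping runs rewritten)
-- by a single pass keeping a running "reach" (right end of the union of zeroing intervals seen so far);
-- equivalence is about the return value (A does not mutate its arguments).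

-- ===== PORT A =====
-- one step of A's outer loop: on a 1→0 transition, clamp span and zero mod_pred[idx..idx+span)
-- (indices are in range under Pre_; List.set out of range is id, int(60*15/interval) = Int.tdiv 900 interval exactly
-- for every nonzero int interval with |interval| ≤ 2^31)
def aStep (observed : List Int) (st : Int × List Int) (idx : Nat) : Int × List Int :=
  if observed.getD idx 0 = 1 ∧ observed.getD (idx + 1) 0 = 0 then
    let span := min st.1 ((observed.length : Int) - (idx : Int))
    (span, (List.range span.toNat).foldl (fun mp off => mp.set (idx + off) 0) st.2)
  else st

def drop_anomaly (predicted : List Int) (observed : List Int) (interval : Int) : List Int :=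
  let span0 : Int := Int.tdiv 900 interval
  ((List.range (observed.length - 1)).foldl (aStep observed) (span0, predicted)).2

-- ===== PORT B =====
-- B's single pass over `predicted`: i is the current index, reach the running right end of zeroed ground
def altGo (observed : List Int) (span0 : Int) : Nat → Int → List Int → List Int
  | _, _, [] => []
  | i, reach, p :: rest =>
    let reach' := if i + 1 < observed.length ∧ observed.getD i 0 = 1 ∧ observed.getD (i + 1) 0 = 0
                  then max reach ((i : Int) + min span0 ((observed.length : Int) - (i : Int)))
                  else reach
    (if (i : Int) < reach' then 0 else p) :: altGo observed span0 (i + 1) reach' rest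

def drop_anomaly_alt (predicted : List Int) (observed : List Int) (interval : Int) : List Int :=
  altGo observed (Int.tdiv 900 interval) 0 0 predicted

-- ===== PRECONDITION & SPEC =====
-- Pre_ excludes exactly the inputs where Python A raises: interval = 0 (ZeroDivisionError), and
-- any 1→0 transition in observed whose zeroing run would write past the end of predicted (IndexError).
def Pre_drop_anomaly (predicted : List Int) (observed : List Int) (interval : Int) : Prop :=
  interval ≠ 0 ∧ ∀ i : Nat, i < observed.length → i + 1 < observed.length →
    observed.getD i 0 = 1 → observed.getD (i + 1) 0 = 0 →
    (Int.tdiv 900 interval ≤ 0 ∨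
      min ((i : Int) + Int.tdiv 900 interval) (observed.length : Int) ≤ (predicted.length : Int))
instance (predicted : List Int) (observed : List Int) (interval : Int) : Decidable (Pre_drop_anomaly predicted observed interval) := by unfold Pre_drop_anomaly; infer_instance

def pvWitness_drop_anomaly : List Int × List Int × Int := ([1, 1, 0, 1], [0, 1, 0, 0], 300)

def Spec_drop_anomaly (predicted : List Int) (observed : List Int) (interval : Int) (out : List Int) : Prop := out = drop_anomaly_alt predicted observed interval
instance (predicted : List Int) (observed : List Int) (interval : Int) (out : List Int) : Decidable (Spec_drop_anomaly predicted observed interval out) := by unfold Spec_drop_anomaly; infer_instance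

-- ===== CLAIM (what is proved, stated in full; the proofs are below) =====
def Claim_equal_drop_anomaly : Prop := ∀ (predicted : List Int) (observed : List Int) (interval : Int), Dom_drop_anomaly predicted observed interval → Pre_drop_anomaly predicted observed interval → Spec_drop_anomaly predicted observed interval (drop_anomaly predicted observed interval)

-- ===== LEMMAS AND PROOFS =====

-- "index j is zeroed by some transition among the first m outer-loop indices"
def coveredUpto (obs : List Int) (span0 : Int) (m j : Nat) : Bool :=
  (List.range m).any (fun t =>
    decide (obs.getD t 0 = 1) && decide (obs.getD (t + 1) 0 = 0) && decide (t ≤ j) &&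
    decide ((j : Int) < (t : Int) + min span0 ((obs.length : Int) - (t : Int))))

-- List.set, pointwise (map form so the out-of-range case needs no length talk)
lemma set_get (l : List Int) (i j : Nat) (a : Int) :
    (l.set i a)[j]? = if i = j then l[j]?.map (fun _ => a) else l[j]? := by
  rw [List.getElem?_set]
  by_cases h : i = j
  · subst h
    rw [if_pos rfl, if_pos rfl]
    by_cases h2 : i < l.length
    · rw [if_pos h2, List.getElem?_eq_getElem h2, Option.map_some]
    · rw [if_neg h2, List.getElem?_eq_none (by omega), Option.map_none]
  · rw [if_neg h, if_neg h]

-- inner zeroing loop, pointwise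
lemma zr_get (mp : List Int) (a : Nat) (k : Nat) (j : Nat) :
    ((List.range k).foldl (fun m off => m.set (a + off) 0) mp)[j]? =
      if a ≤ j ∧ j < a + k then mp[j]?.map (fun _ => (0 : Int)) else mp[j]? := by
  induction k with
  | zero => rw [List.range_zero, List.foldl_nil, if_neg (by omega)]
  | succ k ih =>
    rw [List.range_succ, List.foldl_append]
    simp only [List.foldl_cons, List.foldl_nil]
    rw [set_get]
    by_cases h : a + k = j
    · rw [if_pos h, ih, if_neg (by omega), if_pos (by omega)]
    · rw [if_neg h, ih]
      by_cases h1 : a ≤ j ∧ j < a + k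
      · rw [if_pos h1, if_pos (by omega)]
      · rw [if_neg h1, if_neg (by omega)]

-- invariant of A's outer loop: the span state stays in [min span0 (n-m), span0],
-- and the list state is predicted with exactly the coveredUpto positions zeroed
lemma aFold_char (obs pred : List Int) (span0 : Int) (m : Nat) (hm : m ≤ obs.length - 1) :
    (min span0 ((obs.length : Int) - (m : Int)) ≤ ((List.range m).foldl (aStep obs) (span0, pred)).1 ∧
      ((List.range m).foldl (aStep obs) (span0, pred)).1 ≤ span0) ∧
    ∀ j : Nat, ((List.range m).foldl (aStep obs) (span0, pred)).2[j]? =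
      if coveredUpto obs span0 m j then pred[j]?.map (fun _ => (0 : Int)) else pred[j]? := by
  induction m with
  | zero =>
    refine ⟨⟨min_le_left _ _, le_refl _⟩, ?_⟩
    intro j; simp [coveredUpto]
  | succ m ih =>
    have hm' : m ≤ obs.length - 1 := by omega
    obtain ⟨⟨hlo, hhi⟩, hget⟩ := ih hm'
    rw [List.range_succ, List.foldl_append, List.foldl_cons, List.foldl_nil]
    set st := (List.range m).foldl (aStep obs) (span0, pred) with hst
    have hcov : ∀ j : Nat, coveredUpto obs span0 (m + 1) j =
        (coveredUpto obs span0 m j ||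
          (decide (obs.getD m 0 = 1) && decide (obs.getD (m + 1) 0 = 0) && decide (m ≤ j) &&
            decide ((j : Int) < (m : Int) + min span0 ((obs.length : Int) - (m : Int))))) := by
      intro j; simp [coveredUpto, List.range_succ]
    unfold aStep
    by_cases htr : obs.getD m 0 = 1 ∧ obs.getD (m + 1) 0 = 0
    · rw [if_pos htr]
      have hn : (m : Int) + 1 ≤ (obs.length : Int) - 1 := by
        have : m + 1 ≤ obs.length - 1 := hm
        omega
      -- span collapse: min st.1 (n - m) = min span0 (n - m)
      have hspan : min st.1 ((obs.length : Int) - (m : Int)) = min span0 ((obs.length : Int) - (m : Int)) := by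
        rcases le_total st.1 ((obs.length : Int) - (m : Int)) with h | h <;>
          rcases le_total span0 ((obs.length : Int) - (m : Int)) with h2 | h2 <;>
          rw [min_def, min_def] at * <;> split_ifs at * <;> omega
      constructor
      · constructor
        · simp only [hspan]
          rcases le_total span0 ((obs.length : Int) - (m : Int)) with h | h <;>
            rw [min_def] at * <;> split_ifs <;> omega
        · simp only [hspan]
          exact le_trans (min_le_left _ _) (le_refl _)
      · intro j
        rw [zr_get, hget, hcov]
        have e1 : decide (obs.getD m 0 = 1) = true := decide_eq_true htr.1
        have e2 : decide (obs.getD (m + 1) 0 = 0) = true := decide_eq_true htr.2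
        rw [e1, e2]
        simp only [Bool.true_and]
        have hspan' : min st.1 ((obs.length : Int) - (m : Int)) = min span0 ((obs.length : Int) - (m : Int)) := hspan
        rw [hspan']
        by_cases hz : m ≤ j ∧ j < m + (min span0 ((obs.length : Int) - (m : Int))).toNat
        · rw [if_pos hz]
          have hj : (decide (m ≤ j) && decide ((j : Int) < (m : Int) + min span0 ((obs.length : Int) - (m : Int)))) = true := by
            simp only [Bool.and_eq_true, decide_eq_true_iff]
            omega
          rw [hj, Bool.or_true, if_pos rfl]
          by_cases hc : coveredUpto obs span0 m j
          · rw [if_pos hc]; cases pred[j]? <;> simp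
          · rw [if_neg hc]
        · rw [if_neg hz]
          have hj : (decide (m ≤ j) && decide ((j : Int) < (m : Int) + min span0 ((obs.length : Int) - (m : Int)))) = false := by
            simp only [Bool.and_eq_false_iff, decide_eq_false_iff_not]
            omega
          rw [hj, Bool.or_false]
    · rw [if_neg htr]
      constructor
      · constructor
        · refine le_trans ?_ hlo
          rcases le_total span0 ((obs.length : Int) - (m : Int)) with h | h <;>
            rw [min_def, min_def] <;> split_ifs <;> omega
        · exact hhi
      · intro j
        rw [hget, hcov]
        have : (decide (obs.getD m 0 = 1) && decide (obs.getD (m + 1) 0 = 0) && decide (m ≤ j) &&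
            decide ((j : Int) < (m : Int) + min span0 ((obs.length : Int) - (m : Int)))) = false := by
          rcases not_and_or.mp htr with h | h
          · rw [decide_eq_false h]; simp
          · rw [decide_eq_false h]; simp
        rw [this, Bool.or_false]

-- B's running reach after scanning indices < i
def reachUpto (obs : List Int) (span0 : Int) (i : Nat) : Int :=
  (List.range i).foldl
    (fun r t => if t + 1 < obs.length ∧ obs.getD t 0 = 1 ∧ obs.getD (t + 1) 0 = 0
                then max r ((t : Int) + min span0 ((obs.length : Int) - (t : Int))) else r) 0

lemma reachUpto_succ (obs : List Int) (span0 : Int) (i : Nat) :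
    reachUpto obs span0 (i + 1) =
      (if i + 1 < obs.length ∧ obs.getD i 0 = 1 ∧ obs.getD (i + 1) 0 = 0
       then max (reachUpto obs span0 i) ((i : Int) + min span0 ((obs.length : Int) - (i : Int)))
       else reachUpto obs span0 i) := by
  unfold reachUpto
  rw [List.range_succ, List.foldl_append, List.foldl_cons, List.foldl_nil]

lemma altGo_get (obs : List Int) (span0 : Int) (l : List Int) :
    ∀ (i : Nat) (k : Nat),
      (altGo obs span0 i (reachUpto obs span0 i) l)[k]? =
        if ((i + k : Nat) : Int) < reachUpto obs span0 (i + k + 1)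
        then l[k]?.map (fun _ => (0 : Int)) else l[k]? := by
  induction l with
  | nil => intro i k; simp [altGo]
  | cons p rest ih =>
    intro i k
    unfold altGo
    rw [← reachUpto_succ]
    cases k with
    | zero =>
      simp only [List.getElem?_cons_zero]
      by_cases h : (i : Int) < reachUpto obs span0 (i + 1)
      · rw [if_pos h, if_pos (by simpa using h), Option.map_some]
      · rw [if_neg h, if_neg (by simpa using h)]
    | succ k =>
      simp only [List.getElem?_cons_succ]
      have := ih (i + 1) k
      rw [this]
      have e : i + 1 + k = i + (k + 1) := by omega
      rw [e]

lemma reachUpto_lt_iff (obs : List Int) (span0 : Int) (m : Nat) (x : Int) (hx : 0 ≤ x) :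
    (x < reachUpto obs span0 m) ↔
      ∃ t : Nat, t < m ∧ t + 1 < obs.length ∧ obs.getD t 0 = 1 ∧ obs.getD (t + 1) 0 = 0 ∧
        x < (t : Int) + min span0 ((obs.length : Int) - (t : Int)) := by
  induction m with
  | zero =>
    simp only [reachUpto, List.range_zero, List.foldl_nil]
    constructor
    · intro h; omega
    · rintro ⟨t, ht, _⟩; omega
  | succ m ih =>
    rw [reachUpto_succ]
    by_cases h : m + 1 < obs.length ∧ obs.getD m 0 = 1 ∧ obs.getD (m + 1) 0 = 0
    · rw [if_pos h]
      rw [lt_max_iff, ih]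
      constructor
      · rintro (⟨t, ht, h2, h3, h4, h5⟩ | h5)
        · exact ⟨t, by omega, h2, h3, h4, h5⟩
        · exact ⟨m, by omega, h.1, h.2.1, h.2.2, h5⟩
      · rintro ⟨t, ht, h2, h3, h4, h5⟩
        by_cases htm : t = m
        · subst htm; exact Or.inr h5
        · exact Or.inl ⟨t, by omega, h2, h3, h4, h5⟩
    · rw [if_neg h, ih]
      constructor
      · rintro ⟨t, ht, h2, h3, h4, h5⟩; exact ⟨t, by omega, h2, h3, h4, h5⟩
      · rintro ⟨t, ht, h2, h3, h4, h5⟩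
        by_cases htm : t = m
        · subst htm; exact absurd ⟨h2, h3, h4⟩ h
        · exact ⟨t, by omega, h2, h3, h4, h5⟩

-- the two zeroing criteria coincide
lemma covered_iff_reach (obs : List Int) (span0 : Int) (j : Nat) :
    (coveredUpto obs span0 (obs.length - 1) j = true) ↔
      ((j : Nat) : Int) < reachUpto obs span0 (j + 1) := by
  rw [reachUpto_lt_iff obs span0 (j + 1) (j : Int) (by positivity)]
  unfold coveredUpto
  simp only [List.any_eq_true, List.mem_range, Bool.and_eq_true, decide_eq_true_iff]
  constructor
  · rintro ⟨t, ht, ⟨⟨⟨h1, h2⟩, h3⟩, h4⟩⟩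
    exact ⟨t, by omega, by omega, h1, h2, h4⟩
  · rintro ⟨t, ht, h2, h3, h4, h5⟩
    exact ⟨t, by omega, ⟨⟨⟨h3, h4⟩, by omega⟩, h5⟩⟩

-- ===== VERDICT (by name: the statement is the Claim_ definition above) =====
theorem drop_anomaly_spec : Claim_equal_drop_anomaly := by
  intro predicted observed interval _ _
  unfold Spec_drop_anomaly drop_anomaly drop_anomaly_alt
  apply List.ext_getElem?
  intro j
  obtain ⟨_, hA⟩ := aFold_char observed predicted (Int.tdiv 900 interval) (observed.length - 1) (le_refl _)
  rw [hA j]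
  have hB := altGo_get observed (Int.tdiv 900 interval) predicted 0 j
  have h0 : reachUpto observed (Int.tdiv 900 interval) 0 = 0 := rfl
  rw [h0] at hB
  simp only [Nat.zero_add] at hB
  rw [hB]
  by_cases hc : coveredUpto observed (Int.tdiv 900 interval) (observed.length - 1) j = true
  · rw [if_pos hc, if_pos ((covered_iff_reach _ _ _).mp hc)]
  · rw [if_neg hc, if_neg (fun h => hc ((covered_iff_reach _ _ _).mpr h))]
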